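-- pv_equiv track=rewrite | github.com/PreludeAndFugue/AdventOfCode | 5_2.py | repeat3
-- ===== SOURCE A (Python) =====
-- def repeat3(s):
--     '''Find repeat3 pattern: aba
--
--     >>> repeat3('xyx')
--     True
--     >>> repeat3('xyxy')
--     True
--     >>> repeat3('uurcxstgmygtbstg')
--     False
--     >>> repeat3('ieodomkazucvgmuy')
--     True
--     >>> repeat3('abcdefeghi')
--     True
--     >>> repeat3('aaa')
--     True
--     >>> repeat3('abba')
--     False
--     >>> repeat3('abbab')
--     True
--     '''
--     count = len(s)
--     if count < 3:
--         return False
--     if count == 3: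
--         return s[0] == s[2]
--     for i in range(count - 2):
--         x = s[i:i + 3]
--         if x[0] == x[2]:
--             return True
--     return False
-- ===== SOURCE B (Python) =====
-- def repeat3(s):
--     def has_double(t):
--         return any(a == b for a, b in zip(t, t[1:]))
--     return has_double(s[::2]) or has_double(s[1::2])
-- ===== Notes on version B (the rewrite author's own statement) =====
-- stated objective: alternative
-- what changed: Instead of scanning indexed 3-char windows for s[i]==s[i+2], B splits s into its even- and odd-indexed subsequences (s[::2], s[1::2]) and looks for an ADJACENT duplicate in either, since an aba pattern is exactly an adjacent repeat inside one parity class.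
import Mathlib
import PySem

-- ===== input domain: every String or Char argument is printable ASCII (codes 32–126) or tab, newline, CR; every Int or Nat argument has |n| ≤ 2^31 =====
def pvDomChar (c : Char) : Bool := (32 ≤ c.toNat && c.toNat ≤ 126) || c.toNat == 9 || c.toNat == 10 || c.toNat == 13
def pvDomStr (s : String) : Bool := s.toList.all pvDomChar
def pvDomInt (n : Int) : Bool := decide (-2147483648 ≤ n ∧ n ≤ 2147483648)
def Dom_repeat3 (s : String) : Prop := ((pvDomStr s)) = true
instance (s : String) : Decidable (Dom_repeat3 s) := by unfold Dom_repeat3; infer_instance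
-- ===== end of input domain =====

-- B replaces A's indexed scan over 3-char windows by a parity decomposition: an aba pattern
-- is exactly an adjacent duplicate inside s[::2] or s[1::2] (alternative; same cost).

-- ===== PORT A =====
def repeat3 (s : String) : Bool :=
  let count : Int := PySem.Str.len s
  if count < 3 then false
  else if count = 3 then
    PySem.List.pyGet? s.toList 0 == PySem.List.pyGet? s.toList 2
  else
    (PySem.List.pyRange 0 (count - 2) 1).any (fun i =>
      let x := PySem.List.slice s.toList (some i) (some (i + 3))
      PySem.List.pyGet? x 0 == PySem.List.pyGet? x 2)

-- ===== PORT B =====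
-- has_double(t): any adjacent pair of equal characters (zip(t, t[1:]))
def hasDouble (t : List Char) : Bool :=
  (t.zip (PySem.List.slice t (some 1) none)).any (fun p => p.1 == p.2)

-- s[::2] / s[1::2] are slice? with step 2 (step ≠ 0, so getD never takes its default)
def repeat3_alt (s : String) : Bool :=
  hasDouble ((PySem.List.slice? s.toList none none 2).getD []) ||
  hasDouble ((PySem.List.slice? s.toList (some 1) none 2).getD [])

-- ===== PRECONDITION & SPEC =====
def Spec_repeat3 (s : String) (out : Bool) : Prop := out = repeat3_alt s
instance (s : String) (out : Bool) : Decidable (Spec_repeat3 s out) := by unfold Spec_repeat3; infer_instance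

-- ===== CLAIM (what is proved, stated in full; the proofs are below) =====
def Claim_equal_repeat3 : Prop := ∀ (s : String), Dom_repeat3 s → Spec_repeat3 s (repeat3 s)

-- ===== LEMMAS AND PROOFS =====

theorem pyGet?_zero (cs : List Char) : PySem.List.pyGet? cs 0 = cs[0]? := by
  simpa using PySem.List.pyGet?_natCast cs 0

theorem pyGet?_two (cs : List Char) : PySem.List.pyGet? cs 2 = cs[2]? := by
  simpa using PySem.List.pyGet?_natCast cs 2

-- hasDouble holds iff some adjacent pair of the list is equal
theorem hasDouble_iff (t : List Char) :
    (hasDouble t = true) ↔ ∃ k : Nat, ∃ h : k + 1 < t.length, t[k] = t[k + 1] := by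
  unfold hasDouble
  rw [PySem.List.slice_from_one, List.any_eq_true]
  constructor
  · rintro ⟨p, hp, hpe⟩
    obtain ⟨k, hk, hget⟩ := List.mem_iff_getElem.mp hp
    have hkl : k + 1 < t.length := by
      have := hk; simp [List.length_zip, List.length_tail] at this; omega
    refine ⟨k, hkl, ?_⟩
    have h1 : p = (t[k]'(by omega), t.tail[k]'(by simp [List.length_tail]; omega)) := by
      rw [← hget]; simp [List.getElem_zip]
    have h2 : t.tail[k]'(by simp [List.length_tail]; omega) = t[k + 1]'hkl := by
      simp [List.getElem_tail]
    rw [h1] at hpe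
    simp only [beq_iff_eq] at hpe
    simpa [h2] using hpe
  · rintro ⟨k, hkl, heq⟩
    refine ⟨(t[k]'(by omega), t[k + 1]'hkl), ?_, by simpa using heq⟩
    rw [List.mem_iff_getElem]
    refine ⟨k, by simp [List.length_zip, List.length_tail]; omega, ?_⟩
    simp [List.getElem_zip, List.getElem_tail]

-- the even-indexed subsequence, as a map over range
theorem slice?_even (cs : List Char) :
    PySem.List.slice? cs none none 2 =
      some ((List.range ((cs.length + 1) / 2)).map (fun k => cs.getD (2 * k) 'x')) := by
  unfold PySem.List.slice? PySem.List.sliceIndices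
  norm_num
  have hc : (if 0 < cs.length then (((cs.length : Int) + 2 - 1) / 2).toNat else 0)
      = (cs.length + 1) / 2 := by
    split_ifs with h
    · have : ((cs.length : Int) + 2 - 1) = ((cs.length + 1 : Nat) : Int) := by push_cast; ring
      rw [this]
      have h2 : ((cs.length + 1 : Nat) : Int) / 2 = (((cs.length + 1) / 2 : Nat) : Int) := by
        rw [Int.natCast_ediv]; rfl
      rw [h2, Int.toNat_natCast]
    · omega
  rw [hc]
  rw [List.filterMap_congr (g := fun k => some (cs[2 * k]?.getD 'x')) ?hmem]
  · exact List.filterMap_eq_map_iff_forall_eq_some.mpr fun x _ => rfl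
  case hmem =>
    intro k hk
    rw [List.mem_range] at hk
    have h2k : 2 * k < cs.length := by omega
    have ht : ((2 * (k : Int)).toNat) = 2 * k := by omega
    rw [ht, List.getElem?_eq_getElem h2k]
    simp [List.getElem?_eq_getElem h2k]

-- the odd-indexed subsequence, as a map over range
theorem slice?_odd (cs : List Char) :
    PySem.List.slice? cs (some 1) none 2 =
      some ((List.range (cs.length / 2)).map (fun k => cs.getD (2 * k + 1) 'x')) := by
  unfold PySem.List.slice? PySem.List.sliceIndices
  norm_num
  by_cases h0 : cs = []
  · subst h0; simp
  have hn : 0 < cs.length := List.length_pos_iff.mpr h0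
  have hmin : min (1 : Int) (cs.length : Int) = 1 := by omega
  rw [hmin]
  have hc : (if 1 < cs.length then (((cs.length : Int) - 1 + 2 - 1) / 2).toNat else 0)
      = cs.length / 2 := by
    split_ifs with h
    · have : ((cs.length : Int) - 1 + 2 - 1) = ((cs.length : Nat) : Int) := by ring
      rw [this]
      have h2 : ((cs.length : Nat) : Int) / 2 = ((cs.length / 2 : Nat) : Int) := by
        rw [Int.natCast_ediv]; rfl
      rw [h2, Int.toNat_natCast]
    · omega
  rw [hc]
  rw [List.filterMap_congr (g := fun k => some (cs[2 * k + 1]?.getD 'x')) ?hmem]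
  · exact List.filterMap_eq_map_iff_forall_eq_some.mpr fun x _ => rfl
  case hmem =>
    intro k hk
    rw [List.mem_range] at hk
    have h2k : 2 * k + 1 < cs.length := by omega
    have ht : ((1 + 2 * (k : Int)).toNat) = 2 * k + 1 := by omega
    rw [ht, List.getElem?_eq_getElem h2k]
    simp [List.getElem?_eq_getElem h2k]

-- B holds iff some character equals the one two ahead
theorem alt_iff (s : String) :
    (repeat3_alt s = true) ↔
    ∃ j : Nat, ∃ h : j + 2 < s.toList.length, s.toList[j] = s.toList[j + 2] := by
  unfold repeat3_alt
  rw [slice?_even, slice?_odd]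
  simp only [Option.getD_some, Bool.or_eq_true, hasDouble_iff]
  constructor
  · rintro (⟨k, hk, he⟩ | ⟨k, hk, he⟩)
    · simp only [List.length_map, List.length_range] at hk
      have h2 : 2 * k + 2 < s.toList.length := by omega
      refine ⟨2 * k, h2, ?_⟩
      simp only [List.getElem_map, List.getElem_range] at he
      rw [List.getD_eq_getElem _ _ (by omega), List.getD_eq_getElem _ _ (by omega)] at he
      simpa [show 2 * (k + 1) = 2 * k + 2 by ring] using he
    · simp only [List.length_map, List.length_range] at hk
      have h2 : (2 * k + 1) + 2 < s.toList.length := by omega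
      refine ⟨2 * k + 1, h2, ?_⟩
      simp only [List.getElem_map, List.getElem_range] at he
      rw [List.getD_eq_getElem _ _ (by omega), List.getD_eq_getElem _ _ (by omega)] at he
      simpa [show 2 * (k + 1) + 1 = (2 * k + 1) + 2 by ring] using he
  · rintro ⟨j, hj, he⟩
    rcases Nat.even_or_odd j with ⟨k, hk⟩ | ⟨k, hk⟩
    · left
      refine ⟨k, by simp only [List.length_map, List.length_range]; omega, ?_⟩
      simp only [List.getElem_map, List.getElem_range]
      rw [List.getD_eq_getElem _ _ (by omega), List.getD_eq_getElem _ _ (by omega)]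
      have e1 : 2 * k = j := by omega
      have e2 : 2 * (k + 1) = j + 2 := by omega
      simp only [e1, e2]
      exact he
    · right
      refine ⟨k, by simp only [List.length_map, List.length_range]; omega, ?_⟩
      simp only [List.getElem_map, List.getElem_range]
      rw [List.getD_eq_getElem _ _ (by omega), List.getD_eq_getElem _ _ (by omega)]
      have e1 : 2 * k + 1 = j := by omega
      have e2 : 2 * (k + 1) + 1 = j + 2 := by omega
      simp only [e1, e2]
      exact he

-- A's loop over range(count-2), testing s[i:i+3][0] == s[i:i+3][2], holds iff the same existential
theorem arange_iff (cs : List Char) :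
    ((PySem.List.pyRange 0 ((cs.length : Int) - 2) 1).any (fun i =>
      let x := PySem.List.slice cs (some i) (some (i + 3))
      PySem.List.pyGet? x 0 == PySem.List.pyGet? x 2) = true) ↔
    ∃ j : Nat, ∃ h : j + 2 < cs.length, cs[j] = cs[j + 2] := by
  rw [List.any_eq_true]
  constructor
  · rintro ⟨i, hi, hpe⟩
    rw [PySem.List.mem_pyRange_one] at hi
    obtain ⟨h0, h2⟩ := hi
    obtain ⟨n, rfl⟩ : ∃ n : Nat, i = (n : Int) := ⟨i.toNat, (Int.toNat_of_nonneg h0).symm⟩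
    have hn : n + 2 < cs.length := by omega
    have hsl : PySem.List.slice cs (some (n : Int)) (some ((n : Int) + 3)) = (cs.drop n).take 3 := by
      simpa using PySem.List.slice_natCast_add cs n 3
    have hx0 : ((cs.drop n).take 3)[0]? = some (cs[n]'(by omega)) := by
      rw [List.getElem?_eq_getElem (by simp [List.length_take, List.length_drop]; omega)]
      simp [List.getElem_take, List.getElem_drop]
    have hx2 : ((cs.drop n).take 3)[2]? = some (cs[n + 2]'hn) := by
      rw [List.getElem?_eq_getElem (by simp [List.length_take, List.length_drop]; omega)]
      simp [List.getElem_take, List.getElem_drop]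
    simp only [hsl, pyGet?_zero, pyGet?_two, hx0, hx2, beq_iff_eq, Option.some.injEq] at hpe
    exact ⟨n, hn, by simpa using hpe⟩
  · rintro ⟨j, hjl, heq⟩
    refine ⟨(j : Int), ?_, ?_⟩
    · rw [PySem.List.mem_pyRange_one]; omega
    · have hsl : PySem.List.slice cs (some (j : Int)) (some ((j : Int) + 3)) = (cs.drop j).take 3 := by
        simpa using PySem.List.slice_natCast_add cs j 3
      have hx0 : ((cs.drop j).take 3)[0]? = some (cs[j]'(by omega)) := by
        rw [List.getElem?_eq_getElem (by simp [List.length_take, List.length_drop]; omega)]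
        simp [List.getElem_take, List.getElem_drop]
      have hx2 : ((cs.drop j).take 3)[2]? = some (cs[j + 2]'hjl) := by
        rw [List.getElem?_eq_getElem (by simp [List.length_take, List.length_drop]; omega)]
        simp [List.getElem_take, List.getElem_drop]
      simp only [hsl, pyGet?_zero, pyGet?_two, hx0, hx2, beq_iff_eq, Option.some.injEq]
      exact heq

theorem repeat3_spec' (s : String) : repeat3 s = repeat3_alt s := by
  unfold repeat3
  simp only [PySem.Str.len_eq]
  by_cases h3 : s.toList.length < 3
  · rw [if_pos (by exact_mod_cast h3)]
    rw [Eq.comm, Bool.eq_false_iff, ne_eq, Bool.not_eq_true] at *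
    by_contra hb
    rw [Bool.not_eq_false] at hb
    obtain ⟨j, hj, -⟩ := (alt_iff s).mp hb
    omega
  · rw [if_neg (by omega)]
    by_cases he : s.toList.length = 3
    · rw [if_pos (by omega)]
      rw [Bool.eq_iff_iff, alt_iff]
      have h0 : s.toList[0]? = some (s.toList[0]'(by omega)) :=
        List.getElem?_eq_getElem (by omega)
      have h2 : s.toList[2]? = some (s.toList[2]'(by omega)) :=
        List.getElem?_eq_getElem (by omega)
      simp only [pyGet?_zero, pyGet?_two, h0, h2, beq_iff_eq, Option.some.injEq]
      constructor
      · intro hh; exact ⟨0, by omega, by simpa using hh⟩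
      · rintro ⟨j, hj, hq⟩
        have : j = 0 := by omega
        subst this; simpa using hq
    · rw [if_neg (by omega)]
      rw [Bool.eq_iff_iff, alt_iff, arange_iff]

-- ===== VERDICT (by name: the statement is the Claim_ definition above) =====
theorem repeat3_spec : Claim_equal_repeat3 := by
  intro s _
  exact repeat3_spec' s
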